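-- pv_equiv track=rewrite | github.com/imarban/algorithms | python/largest_sum_subarray.py | get_largest_sum
-- ===== SOURCE A (Python) =====
-- flatten = lambda l: [item for sublist in l for item in sublist]
--
-- def get_largest_sum(values, k):
--     sums = [0] * (len(values) - k + 1)
--     for i in range(len(values)):
--         sums_limit = min(i + 1, len(sums))
--         for j in range(sums_limit):
--             if i - k == j:
--                 sums[j] = [sums[j], sums[j] + values[i]]
--             elif i - k > j:
--                 sums[j].append(sums[j][-1] + values[i])
--             else:
--                 sums[j] += values[i]
--
--     sums[-1] = [sums[-1]]
--
--     return max(flatten(sums))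
-- ===== SOURCE B (Python) =====
-- def get_largest_sum(values, k):
--     # Prefix sums: answer = max over i in [k, n] of P[i] - min(P[0..i-k]).
--     P = [0]
--     for v in values:
--         P.append(P[-1] + v)
--     best = None
--     m = P[0]
--     for i in range(k, len(P)):
--         m = min(m, P[i - k])
--         c = P[i] - m
--         best = c if best is None or c > best else best
--     return best
-- ===== Notes on version B (the rewrite author's own statement) =====
-- stated objective: faster
-- what changed: Replaces the quadratic table of per-start running sums with a single O(n) pass over prefix sums that tracks the minimum prefix k positions back.
import Mathlib
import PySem

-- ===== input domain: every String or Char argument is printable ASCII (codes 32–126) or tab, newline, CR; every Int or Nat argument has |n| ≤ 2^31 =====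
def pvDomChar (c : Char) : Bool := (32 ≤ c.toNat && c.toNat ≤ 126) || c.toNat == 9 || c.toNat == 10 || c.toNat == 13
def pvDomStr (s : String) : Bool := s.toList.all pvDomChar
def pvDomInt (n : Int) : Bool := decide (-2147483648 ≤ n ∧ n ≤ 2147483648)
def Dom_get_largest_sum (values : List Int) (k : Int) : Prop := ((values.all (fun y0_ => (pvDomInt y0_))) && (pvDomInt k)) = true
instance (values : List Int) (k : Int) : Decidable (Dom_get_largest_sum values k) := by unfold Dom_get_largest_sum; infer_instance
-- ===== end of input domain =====

-- B replaces A's quadratic table of per-start running sums by one O(n) pass over prefix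
-- sums that tracks the minimum prefix k positions back (objective: faster, asymptotic).

-- ===== PORT A =====
-- A's table entries are Python ints that later become Python lists: modelled as a sum
-- type. In the branches Python's dynamic typing makes unreachable on inputs satisfying
-- Pre_ (an int where a list is expected or vice versa — Python raises there), the port
-- keeps the entry unchanged.
def glsStep (vi k i j : Int) (e : Int ⊕ List Int) : Int ⊕ List Int :=
  if i - k = j then
    match e with
    | .inl s => .inr [s, s + vi]
    | .inr l => .inr l
  else if i - k > j then
    match e with
    | .inr l => .inr (l ++ [PySem.List.pyGetD l (-1) 0 + vi])
    | .inl s => .inl s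
  else
    match e with
    | .inl s => .inl (s + vi)
    | .inr l => .inr l

def get_largest_sum (values : List Int) (k : Int) : Int :=
  let sums0 : List (Int ⊕ List Int) :=
    List.replicate (PySem.List.len values - k + 1).toNat (.inl 0)
  let sums :=
    (PySem.List.pyRange 0 (PySem.List.len values) 1).foldl
      (fun s i =>
        let vi := PySem.List.pyGetD values i 0
        let limit := min (i + 1) (PySem.List.len s)
        (PySem.List.pyRange 0 limit 1).foldl
          (fun s j => PySem.List.pySetD s j (glsStep vi k i j (PySem.List.pyGetD s j (.inl 0)))) s)
      sums0
  let sums2 := PySem.List.pySetD sums (-1)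
      (match PySem.List.pyGetD sums (-1) (.inl 0) with
       | .inl s => .inr [s]
       | .inr l => .inr l)
  let flat := sums2.flatMap (fun e => match e with | .inl s => [s] | .inr l => l)
  (PySem.List.max? flat (fun x => x)).getD 0

-- ===== PORT B =====
def get_largest_sum_alt (values : List Int) (k : Int) : Int :=
  let P := values.foldl (fun P v => P ++ [PySem.List.pyGetD P (-1) 0 + v]) [0]
  let r :=
    (PySem.List.pyRange k (PySem.List.len P) 1).foldl
      (fun (st : Int × Option Int) i =>
        let m := min st.1 (PySem.List.pyGetD P (i - k) 0)
        let c := PySem.List.pyGetD P i 0 - m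
        (m, match st.2 with
            | none => some c
            | some b => if c > b then some c else some b))
      (PySem.List.pyGetD P 0 0, none)
  r.2.getD 0

-- ===== PRECONDITION & SPEC =====
-- Python A raises (IndexError / AttributeError / TypeError) exactly when k < 0 or
-- k > len(values); Pre_ admits every input on which A returns.
def Pre_get_largest_sum (values : List Int) (k : Int) : Prop :=
  0 ≤ k ∧ k ≤ (values.length : Int)
instance (values : List Int) (k : Int) : Decidable (Pre_get_largest_sum values k) := by
  unfold Pre_get_largest_sum; infer_instance

def pvWitness_get_largest_sum : List Int × Int := ([1, -2, 3], 2)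

def Spec_get_largest_sum (values : List Int) (k : Int) (out : Int) : Prop := out = get_largest_sum_alt values k
instance (values : List Int) (k : Int) (out : Int) : Decidable (Spec_get_largest_sum values k out) := by
  unfold Spec_get_largest_sum; infer_instance

-- ===== CLAIM (what is proved, stated in full; the proofs are below) =====
def Claim_equal_get_largest_sum : Prop := ∀ (values : List Int) (k : Int), Dom_get_largest_sum values k → Pre_get_largest_sum values k → Spec_get_largest_sum values k (get_largest_sum values k)

-- ===== LEMMAS AND PROOFS =====
-- Both programs compute the maximum of the SAME set: sums of contiguous subarrays of
-- length ≥ k, written as differences of prefix sums.  gls_A_isMax characterises A's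
-- table-based result, gls_B_isMax the prefix-sum scan of B; the maximum is unique.

def glsPf (values : List Int) (m : Nat) : Int := (values.take m).sum

theorem glsPf_succ (values : List Int) (m : Nat) (h : m < values.length) :
    glsPf values (m + 1) = glsPf values m + values[m] := by
  simpa [glsPf] using List.sum_take_succ values m h

def glsSet (values : List Int) (K : Nat) : Set Int :=
  {x | ∃ j i : Nat, j + K ≤ i ∧ i ≤ values.length ∧ x = glsPf values i - glsPf values j}

def IsMaxOf (b : Int) (S : Set Int) : Prop := b ∈ S ∧ ∀ x ∈ S, x ≤ b

def IsMinOf (b : Int) (S : Set Int) : Prop := b ∈ S ∧ ∀ x ∈ S, b ≤ x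

theorem isMaxOf_unique {a b : Int} {S : Set Int} (ha : IsMaxOf a S) (hb : IsMaxOf b S) : a = b :=
  le_antisymm (hb.2 a ha.1) (ha.2 b hb.1)

def glsEntry (values : List Int) (K c j : Nat) : Int ⊕ List Int :=
  if j + K < c then
    .inr ((List.range (c - j - K + 1)).map (fun t => glsPf values (j + K + t) - glsPf values j))
  else
    .inl (glsPf values (j + (c - j)) - glsPf values j)

theorem gls_inner_loop {E : Type} (f : Int → E → E) (d : E) (m : Nat) (st : List E) :
    (PySem.List.pyRange 0 (m : Int) 1).foldl
      (fun s j => PySem.List.pySetD s j (f j (PySem.List.pyGetD s j d))) st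
    = st.mapIdx (fun idx e => if idx < m then f (idx : Int) e else e) := by
  induction m with
  | zero =>
    rw [PySem.List.pyRange_one_eq_nil (by simp)]
    simp only [List.foldl_nil]
    apply List.ext_getElem (by simp)
    intro i h1 h2
    simp [List.getElem_mapIdx]
  | succ m ih =>
    have hc : ((m + 1 : Nat) : Int) = (m : Int) + 1 := by push_cast; ring
    rw [hc, PySem.List.pyRange_one_succ_right (by positivity), List.foldl_append, ih]
    simp only [List.foldl_cons, List.foldl_nil]
    rw [PySem.List.pySetD_natCast, PySem.List.pyGetD_natCast]
    apply List.ext_getElem (by simp)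
    intro i h1 h2
    simp only [List.getElem_set, List.getElem_mapIdx]
    by_cases him : m = i
    · subst him
      have hlt : m < st.length := by simpa using h2
      simp [List.getD_eq_getElem?_getD, List.getElem?_mapIdx, List.getElem?_eq_getElem hlt]
    · simp only [if_neg him]
      rcases Nat.lt_or_ge i m with h | h
      · rw [if_pos h, if_pos (by omega)]
      · rw [if_neg (by omega), if_neg (by omega)]

theorem gls_entry_step (values : List Int) (K c j : Nat) (hc : c < values.length)
    (hj : j < values.length - K + 1) :
    (if j < min (c + 1) (values.length - K + 1) then
       glsStep (PySem.List.pyGetD values (c : Int) 0) (K : Int) (c : Int) (j : Int)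
         (glsEntry values K c j)
     else glsEntry values K c j) = glsEntry values K (c + 1) j := by
  have hvi : PySem.List.pyGetD values (c : Int) 0 = values[c] := by
    rw [PySem.List.pyGetD_natCast]; exact List.getD_eq_getElem values 0 hc
  by_cases hjc : j < min (c + 1) (values.length - K + 1)
  · rw [if_pos hjc]
    have hjle : j ≤ c := by omega
    rcases Nat.lt_trichotomy (j + K) c with hgt | heq | hlt
    · -- appending case: c > j + K
      have ht1 : ¬ ((c : Int) - (K : Int) = (j : Int)) := by
        intro h; omega
      have ht2 : (c : Int) - (K : Int) > (j : Int) := by omega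
      rw [glsEntry, if_pos hgt, glsStep, if_neg ht1, if_pos ht2]
      rw [glsEntry, if_pos (by omega)]
      have hr2 : List.range (c + 1 - j - K + 1) = List.range (c - j - K + 1) ++ [c - j - K + 1] := by
        have : c + 1 - j - K + 1 = (c - j - K + 1) + 1 := by omega
        rw [this, List.range_succ]
      have hlast : PySem.List.pyGetD ((List.range (c - j - K + 1)).map
          (fun t => glsPf values (j + K + t) - glsPf values j)) (-1) 0
          = glsPf values (j + K + (c - j - K)) - glsPf values j := by
        rw [List.range_succ, List.map_append, List.map_singleton,
          PySem.List.pyGetD_neg_one_append_singleton]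
      rw [hlast, hr2, List.map_append, List.map_singleton]
      have e1 : j + K + (c - j - K) = c := by omega
      have e2 : j + K + (c - j - K + 1) = c + 1 := by omega
      rw [e1, e2, hvi, glsPf_succ values c hc]
      simp only [Sum.inr.injEq, List.append_right_inj, List.cons.injEq, and_true]
      omega
    · -- becomes a list: c = j + K
      have ht1 : (c : Int) - (K : Int) = (j : Int) := by omega
      rw [glsEntry, if_neg (by omega), glsStep, if_pos ht1]
      have e0 : j + (c - j) = c := by omega
      rw [glsEntry, if_pos (by omega)]
      have : c + 1 - j - K + 1 = 2 := by omega
      rw [this, e0]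
      have : List.range 2 = [0, 1] := rfl
      rw [this]
      simp only [List.map_cons, List.map_nil]
      have e1 : j + K + 0 = c := by omega
      have e2 : j + K + 1 = c + 1 := by omega
      rw [e1, e2, hvi, glsPf_succ values c hc]
      congr 3
      omega
    · -- still an int: c < j + K
      have ht1 : ¬ ((c : Int) - (K : Int) = (j : Int)) := by intro h; omega
      have ht2 : ¬ ((c : Int) - (K : Int) > (j : Int)) := by omega
      rw [glsEntry, if_neg (by omega), glsStep, if_neg ht1, if_neg ht2]
      rw [glsEntry, if_neg (by omega)]
      have e0 : j + (c - j) = c := by omega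
      have e1 : j + (c + 1 - j) = c + 1 := by omega
      rw [e0, e1, hvi, glsPf_succ values c hc]
      congr 1
      omega
  · rw [if_neg hjc]
    have hjc' : c + 1 ≤ j := by omega
    rw [glsEntry, glsEntry, if_neg (by omega), if_neg (by omega)]
    have e0 : j + (c - j) = j := by omega
    have e1 : j + (c + 1 - j) = j := by omega
    rw [e0, e1]

theorem gls_outer_inv (values : List Int) (K : Nat) (c : Nat)
    (hc : c ≤ values.length) :
    (PySem.List.pyRange 0 (c : Int) 1).foldl
      (fun s i =>
        (PySem.List.pyRange 0 (min (i + 1) (PySem.List.len s)) 1).foldl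
          (fun s j => PySem.List.pySetD s j
            (glsStep (PySem.List.pyGetD values i 0) (K : Int) i j (PySem.List.pyGetD s j (.inl 0)))) s)
      (List.replicate (values.length - K + 1) (.inl 0))
    = (List.range (values.length - K + 1)).map (glsEntry values K c) := by
  induction c with
  | zero =>
    rw [Nat.cast_zero, PySem.List.pyRange_one_eq_nil le_rfl, List.foldl_nil]
    apply List.ext_getElem (by simp)
    intro i h1 h2
    simp only [List.getElem_replicate, List.getElem_map, List.getElem_range, glsEntry]
    rw [if_neg (by omega)]
    have e : i + (0 - i) = i := by omega
    rw [e]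
    simp
  | succ c ih =>
    have hcast : ((c + 1 : Nat) : Int) = (c : Int) + 1 := by push_cast; ring
    rw [hcast, PySem.List.pyRange_one_succ_right (by positivity), List.foldl_append,
      ih (by omega), List.foldl_cons, List.foldl_nil]
    simp only [PySem.List.len_eq, List.length_map, List.length_range]
    have hmin : min ((c : Int) + 1) ((values.length - K + 1 : Nat) : Int)
        = ((min (c + 1) (values.length - K + 1) : Nat) : Int) := by push_cast; omega
    rw [hmin, gls_inner_loop]
    apply List.ext_getElem (by simp)
    intro j h1 h2
    simp only [List.getElem_mapIdx, List.getElem_map, List.getElem_range]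
    exact gls_entry_step values K c j (by omega) (by simpa using h1)

theorem gls_pySetD_neg_one {α : Type} (xs : List α) (x v : α) :
    PySem.List.pySetD (xs ++ [x]) (-1) v = xs ++ [v] := by
  simp [PySem.List.pySetD, PySem.List.pySet?, PySem.List.pyIdx?]

theorem gls_A_isMax (values : List Int) (K : Nat) (hK : K ≤ values.length) :
    IsMaxOf (get_largest_sum values (K : Int)) (glsSet values K) := by
  have hlen : PySem.List.len values = (values.length : Int) := by simp
  have htn : ((values.length : Int) - (K : Int) + 1).toNat = values.length - K + 1 := by omega
  unfold get_largest_sum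
  dsimp only []
  rw [hlen, htn]
  rw [gls_outer_inv values K values.length le_rfl]
  set n := values.length with hn
  set L := n - K + 1 with hL
  have hrs : List.range L = List.range (L - 1) ++ [L - 1] := by
    conv_lhs => rw [show L = (L - 1) + 1 by omega]
    exact List.range_succ
  rw [hrs, List.map_append, List.map_singleton]
  have hlastE : glsEntry values K n (L - 1) = Sum.inl (glsPf values n - glsPf values (n - K)) := by
    rw [glsEntry, if_neg (by omega)]
    have e1 : (L - 1) + (n - (L - 1)) = n := by omega
    have e2 : L - 1 = n - K := by omega
    rw [e1, e2]
  rw [hlastE, PySem.List.pyGetD_neg_one_append_singleton]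
  dsimp only []
  rw [gls_pySetD_neg_one]
  have hflat : List.map (glsEntry values K n) (List.range (L - 1))
        ++ [Sum.inr [glsPf values n - glsPf values (n - K)]]
      = (List.range L).map (fun j =>
          (Sum.inr ((List.range (n - j - K + 1)).map
            (fun t => glsPf values (j + K + t) - glsPf values j)) : Int ⊕ List Int)) := by
    conv_rhs => rw [hrs, List.map_append, List.map_singleton]
    congr 1
    · apply List.ext_getElem (by simp)
      intro j h1 h2
      simp only [List.getElem_map, List.getElem_range]
      rw [glsEntry, if_pos (by simp at h1; omega)]
    · have e1 : n - (L - 1) - K + 1 = 1 := by omega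
      rw [e1, List.range_one, List.map_singleton]
      have e2 : (L - 1) + K + 0 = n := by omega
      rw [e2, show L - 1 = n - K by omega]
  rw [hflat, List.flatMap_map]
  set FL : Nat → List Int := fun j => (List.range (n - j - K + 1)).map
    (fun t => glsPf values (j + K + t) - glsPf values j) with hFL
  have hmem : ∀ x, x ∈ (List.range L).flatMap FL ↔ x ∈ glsSet values K := by
    intro x
    simp only [List.mem_flatMap, List.mem_range, hFL, List.mem_map, glsSet, Set.mem_setOf_eq]
    constructor
    · rintro ⟨j, hj, t, ht, rfl⟩
      exact ⟨j, j + K + t, by omega, by omega, rfl⟩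
    · rintro ⟨j, i, hji, hin, rfl⟩
      refine ⟨j, by omega, i - j - K, by omega, ?_⟩
      rw [show j + K + (i - j - K) = i by omega]
  have hx0 : (glsPf values K - glsPf values 0) ∈ (List.range L).flatMap FL := by
    apply (hmem _).mpr
    exact ⟨0, K, by omega, by omega, rfl⟩
  cases hmax : PySem.List.max? ((List.range L).flatMap FL) (fun x => x) with
  | none =>
    rw [PySem.List.max?_eq_none_iff] at hmax
    rw [hmax] at hx0
    simp at hx0
  | some b =>
    simp only [Option.getD_some]
    exact ⟨(hmem b).mp (PySem.List.max?_mem hmax),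
      fun x hx => PySem.List.max?_isMax hmax x ((hmem x).mpr hx)⟩

theorem gls_P_build (values : List Int) :
    values.foldl (fun P v => P ++ [PySem.List.pyGetD P (-1) 0 + v]) [0]
    = (List.range (values.length + 1)).map (glsPf values) := by
  suffices h : ∀ (suf pre : List Int), pre ++ suf = values →
      suf.foldl (fun P v => P ++ [PySem.List.pyGetD P (-1) 0 + v])
        ((List.range (pre.length + 1)).map (glsPf values))
      = (List.range (values.length + 1)).map (glsPf values) by
    have h0 := h values [] rfl
    simpa [glsPf] using h0
  intro suf
  induction suf with
  | nil =>
    intro pre hpre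
    rw [List.foldl_nil, List.append_nil] at *
    rw [hpre]
  | cons v suf ih =>
    intro pre hpre
    have hm : pre.length < values.length := by
      rw [← hpre]; simp
    rw [List.foldl_cons]
    have hlast : PySem.List.pyGetD ((List.range (pre.length + 1)).map (glsPf values)) (-1) 0
        = glsPf values pre.length := by
      rw [List.range_succ, List.map_append, List.map_singleton,
        PySem.List.pyGetD_neg_one_append_singleton]
    have hv : values[pre.length]'hm = v := by
      have h1 : values[pre.length]? = some v := by
        rw [← hpre, ← PySem.List.pyGet?_natCast, PySem.List.pyGet?_append_length]
      simpa [List.getElem?_eq_getElem hm] using h1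
    have hstep : glsPf values pre.length + v = glsPf values (pre.length + 1) := by
      rw [glsPf_succ values pre.length hm, hv]
    rw [hlast, hstep]
    have hext : (List.range (pre.length + 1)).map (glsPf values) ++ [glsPf values (pre.length + 1)]
        = (List.range ((pre ++ [v]).length + 1)).map (glsPf values) := by
      have : (pre ++ [v]).length + 1 = (pre.length + 1) + 1 := by simp
      rw [this]
      conv_rhs => rw [List.range_succ, List.map_append, List.map_singleton]
    rw [hext]
    exact ih (pre ++ [v]) (by simpa using hpre)

theorem isMaxOf_union {b c : Int} {S T : Set Int} (hb : IsMaxOf b S) (hc : IsMaxOf c T) :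
    IsMaxOf (if c > b then c else b) (S ∪ T) := by
  constructor
  · by_cases h : c > b
    · rw [if_pos h]; exact Or.inr hc.1
    · rw [if_neg h]; exact Or.inl hb.1
  · rintro x (hx | hx)
    · have := hb.2 x hx
      by_cases h : c > b
      · rw [if_pos h]; omega
      · rw [if_neg h]; omega
    · have := hc.2 x hx
      by_cases h : c > b
      · rw [if_pos h]; omega
      · rw [if_neg h]; omega

theorem isMaxOf_congr {b : Int} {S T : Set Int} (hb : IsMaxOf b S) (he : S = T) :
    IsMaxOf b T := he ▸ hb

theorem gls_isMin_min (values : List Int) {a : Int} {r : Nat} (x : Int) (hr : x = glsPf values r)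
    (h : IsMinOf a {x | ∃ j : Nat, j ≤ r - 1 ∧ x = glsPf values j}) :
    IsMinOf (min a x) {x | ∃ j : Nat, j ≤ r ∧ x = glsPf values j} := by
  constructor
  · rcases le_total a x with hle | hle
    · rw [min_eq_left hle]
      obtain ⟨j, hj, hv⟩ := h.1
      exact ⟨j, by omega, hv⟩
    · rw [min_eq_right hle]
      exact ⟨r, le_rfl, hr⟩
  · rintro y ⟨j, hj, rfl⟩
    by_cases hj' : j ≤ r - 1
    · exact le_trans (min_le_left a x) (h.2 _ ⟨j, hj', rfl⟩)
    · have : j = r := by omega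
      subst this
      rw [← hr]
      exact min_le_right a x

theorem gls_isMax_sub (values : List Int) {a : Int} {r m : Nat}
    (h : IsMinOf a {x | ∃ j : Nat, j ≤ r ∧ x = glsPf values j}) :
    IsMaxOf (glsPf values m - a)
      {x | ∃ j : Nat, j ≤ r ∧ x = glsPf values m - glsPf values j} := by
  constructor
  · obtain ⟨j, hj, hv⟩ := h.1
    exact ⟨j, hj, by rw [hv]⟩
  · rintro x ⟨j, hj, rfl⟩
    have := h.2 (glsPf values j) ⟨j, hj, rfl⟩
    omega

theorem gls_P_get (values : List Int) (r : Nat) (hr : r ≤ values.length) :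
    PySem.List.pyGetD ((List.range (values.length + 1)).map (glsPf values)) (r : Int) 0
      = glsPf values r := by
  rw [PySem.List.pyGetD_natCast, List.getD_eq_getElem?_getD, List.getElem?_map,
    List.getElem?_range (by omega)]
  rfl

theorem gls_B_inv (values : List Int) (K : Nat) :
    ∀ (m : Nat), K ≤ m → m ≤ values.length + 1 →
    ∀ s : Int × Option Int,
    s = (PySem.List.pyRange (K : Int) (m : Int) 1).foldl
      (fun (st : Int × Option Int) (i : Int) =>
        (min st.1 (PySem.List.pyGetD ((List.range (values.length + 1)).map (glsPf values)) (i - (K : Int)) 0),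
          match st.2 with
          | none =>
            some (PySem.List.pyGetD ((List.range (values.length + 1)).map (glsPf values)) i 0 -
              min st.1 (PySem.List.pyGetD ((List.range (values.length + 1)).map (glsPf values)) (i - (K : Int)) 0))
          | some b =>
            if PySem.List.pyGetD ((List.range (values.length + 1)).map (glsPf values)) i 0 -
                min st.1 (PySem.List.pyGetD ((List.range (values.length + 1)).map (glsPf values)) (i - (K : Int)) 0) > b then
              some (PySem.List.pyGetD ((List.range (values.length + 1)).map (glsPf values)) i 0 -
                min st.1 (PySem.List.pyGetD ((List.range (values.length + 1)).map (glsPf values)) (i - (K : Int)) 0))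
            else some b))
      (PySem.List.pyGetD ((List.range (values.length + 1)).map (glsPf values)) 0 0, none) →
    IsMinOf s.1 {x | ∃ j : Nat, j ≤ m - K - 1 ∧ x = glsPf values j} ∧
    ((m = K ∧ s.2 = none) ∨
      (K < m ∧ ∃ b, s.2 = some b ∧ IsMaxOf b
        {x | ∃ i j : Nat, K ≤ i ∧ i ≤ m - 1 ∧ j + K ≤ i ∧ x = glsPf values i - glsPf values j})) := by
  intro m hm1
  induction m, hm1 using Nat.le_induction with
  | base =>
    intro _ s hs
    rw [PySem.List.pyRange_one_eq_nil le_rfl, List.foldl_nil] at hs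
    have h0 : PySem.List.pyGetD ((List.range (values.length + 1)).map (glsPf values)) 0 0
        = glsPf values 0 := by
      have := gls_P_get values 0 (by omega)
      simpa using this
    subst hs
    constructor
    · constructor
      · exact ⟨0, by omega, h0⟩
      · rintro x ⟨j, hj, rfl⟩
        have : j = 0 := by omega
        subst this
        rw [h0]
    · exact Or.inl ⟨rfl, rfl⟩
  | succ m hm ih =>
    intro hm2 s hs
    have hcast : ((m + 1 : Nat) : Int) = (m : Int) + 1 := by push_cast; ring
    rw [hcast, PySem.List.pyRange_one_succ_right (by exact_mod_cast hm), List.foldl_append,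
      List.foldl_cons, List.foldl_nil] at hs
    set sold := (PySem.List.pyRange (K : Int) (m : Int) 1).foldl
      (fun (st : Int × Option Int) (i : Int) =>
        (min st.1 (PySem.List.pyGetD ((List.range (values.length + 1)).map (glsPf values)) (i - (K : Int)) 0),
          match st.2 with
          | none =>
            some (PySem.List.pyGetD ((List.range (values.length + 1)).map (glsPf values)) i 0 -
              min st.1 (PySem.List.pyGetD ((List.range (values.length + 1)).map (glsPf values)) (i - (K : Int)) 0))
          | some b =>
            if PySem.List.pyGetD ((List.range (values.length + 1)).map (glsPf values)) i 0 -
                min st.1 (PySem.List.pyGetD ((List.range (values.length + 1)).map (glsPf values)) (i - (K : Int)) 0) > b then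
              some (PySem.List.pyGetD ((List.range (values.length + 1)).map (glsPf values)) i 0 -
                min st.1 (PySem.List.pyGetD ((List.range (values.length + 1)).map (glsPf values)) (i - (K : Int)) 0))
            else some b))
      (PySem.List.pyGetD ((List.range (values.length + 1)).map (glsPf values)) 0 0, none) with hsold
    obtain ⟨hmin, hrest⟩ := ih (by omega) sold rfl
    have hgm : PySem.List.pyGetD ((List.range (values.length + 1)).map (glsPf values)) (m : Int) 0
        = glsPf values m := gls_P_get values m (by omega)
    have hgmK : PySem.List.pyGetD ((List.range (values.length + 1)).map (glsPf values)) ((m : Int) - (K : Int)) 0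
        = glsPf values (m - K) := by
      have he : (m : Int) - (K : Int) = ((m - K : Nat) : Int) := by omega
      rw [he]
      exact gls_P_get values (m - K) (by omega)
    rw [hgm, hgmK] at hs
    have hmin' : IsMinOf (min sold.1 (glsPf values (m - K)))
        {x | ∃ j : Nat, j ≤ m - K ∧ x = glsPf values j} := by
      have := gls_isMin_min values (glsPf values (m - K)) rfl (by
        have he : m - K - 1 = (m - K) - 1 := rfl
        exact hmin)
      exact this
    constructor
    · have he : m + 1 - K - 1 = m - K := by omega
      rw [hs, he]
      exact hmin'
    · right
      refine ⟨by omega, ?_⟩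
      rcases hrest with ⟨hmK, hnone⟩ | ⟨hKm, b, hsome, hmax⟩
      · rw [hnone] at hs
        refine ⟨glsPf values m - min sold.1 (glsPf values (m - K)), by rw [hs], ?_⟩
        have hc := gls_isMax_sub values (m := m) hmin'
        refine isMaxOf_congr hc ?_
        ext x
        simp only [Set.mem_setOf_eq]
        constructor
        · rintro ⟨j, hj, rfl⟩
          exact ⟨m, j, by omega, by omega, by omega, rfl⟩
        · rintro ⟨i, j, hKi, him, hji, rfl⟩
          have : i = m := by omega
          subst this
          exact ⟨j, by omega, rfl⟩
      · rw [hsome] at hs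
        have hc := gls_isMax_sub values (m := m) hmin'
        have hu := isMaxOf_union hmax hc
        refine ⟨_, ?_, isMaxOf_congr hu ?_⟩
        · rw [hs]
          by_cases hcb : glsPf values m - min sold.1 (glsPf values (m - K)) > b
          · rw [if_pos hcb]
            simp [hcb]
          · rw [if_neg hcb]
            simp [hcb]
        · ext x
          simp only [Set.mem_union, Set.mem_setOf_eq]
          constructor
          · rintro (⟨i, j, hKi, him, hji, rfl⟩ | ⟨j, hj, rfl⟩)
            · exact ⟨i, j, by omega, by omega, by omega, rfl⟩
            · exact ⟨m, j, by omega, by omega, by omega, rfl⟩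
          · rintro ⟨i, j, hKi, him, hji, rfl⟩
            by_cases hi : i ≤ m - 1
            · exact Or.inl ⟨i, j, by omega, by omega, by omega, rfl⟩
            · have : i = m := by omega
              subst this
              exact Or.inr ⟨j, by omega, rfl⟩

theorem gls_B_isMax (values : List Int) (K : Nat) (hK : K ≤ values.length) :
    IsMaxOf (get_largest_sum_alt values (K : Int)) (glsSet values K) := by
  unfold get_largest_sum_alt
  dsimp only []
  rw [gls_P_build]
  rw [show PySem.List.len ((List.range (values.length + 1)).map (glsPf values))
      = (((values.length + 1 : Nat) : Nat) : Int) from by simp]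
  obtain ⟨-, hrest⟩ := gls_B_inv values K (values.length + 1) (by omega) (by omega) _ rfl
  rcases hrest with ⟨habs, -⟩ | ⟨-, b, hsome, hmax⟩
  · omega
  · rw [hsome, Option.getD_some]
    refine isMaxOf_congr hmax ?_
    ext x
    simp only [Set.mem_setOf_eq, glsSet]
    constructor
    · rintro ⟨i, j, hKi, him, hji, rfl⟩
      exact ⟨j, i, by omega, by omega, rfl⟩
    · rintro ⟨j, i, hji, hin, rfl⟩
      exact ⟨i, j, by omega, by omega, by omega, rfl⟩

-- ===== VERDICT (by name: the statement is the Claim_ definition above) =====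
theorem get_largest_sum_spec : Claim_equal_get_largest_sum := by
  intro values k _ hpre
  unfold Pre_get_largest_sum at hpre
  obtain ⟨hk0, hkn⟩ := hpre
  have hk : k = (k.toNat : Int) := (Int.toNat_of_nonneg hk0).symm
  have hKn : k.toNat ≤ values.length := by omega
  unfold Spec_get_largest_sum
  rw [hk]
  exact isMaxOf_unique (gls_A_isMax values k.toNat hKn) (gls_B_isMax values k.toNat hKn)
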